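-- pv_equiv track=rewrite | github.com/Pras7616533/Unique_calculator | Python/BASE.py | decimal_to_base64
-- ===== SOURCE A (Python) =====
-- def decimal_to_base64(decimal_number):
--     if decimal_number == 0:
--         return '0'
--     base64_chars = "ABCDEFGHIJKLMNOPQRSTUVWXYZabcdefghijklmnopqrstuvwxyz0123456789+/"
--     base64_str = ""
--     while decimal_number > 0:
--         remainder = decimal_number % 64
--         base64_str = base64_chars[remainder] + base64_str
--         decimal_number = decimal_number // 64
--     return base64_str
-- ===== SOURCE B (Python) =====
-- def decimal_to_base64(decimal_number):
--     if decimal_number == 0: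
--         return '0'
--     base64_chars = "ABCDEFGHIJKLMNOPQRSTUVWXYZabcdefghijklmnopqrstuvwxyz0123456789+/"
--     weight = 1
--     while weight * 64 <= decimal_number:
--         weight *= 64
--     digits = []
--     while weight >= 1:
--         digits.append(base64_chars[decimal_number // weight])
--         decimal_number %= weight
--         weight //= 64
--     return ''.join(digits)
-- ===== Notes on version B (the rewrite author's own statement) =====
-- stated objective: alternative
-- what changed: B extracts digits MSB-first by first computing the highest power-of-64 place value and then dividing by a descending weight, instead of A's LSB-first repeated division with string prepending.
-- outside the precondition, e.g. on decimal_to_base64(-5): A returns '', B returns '7'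
import Mathlib
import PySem

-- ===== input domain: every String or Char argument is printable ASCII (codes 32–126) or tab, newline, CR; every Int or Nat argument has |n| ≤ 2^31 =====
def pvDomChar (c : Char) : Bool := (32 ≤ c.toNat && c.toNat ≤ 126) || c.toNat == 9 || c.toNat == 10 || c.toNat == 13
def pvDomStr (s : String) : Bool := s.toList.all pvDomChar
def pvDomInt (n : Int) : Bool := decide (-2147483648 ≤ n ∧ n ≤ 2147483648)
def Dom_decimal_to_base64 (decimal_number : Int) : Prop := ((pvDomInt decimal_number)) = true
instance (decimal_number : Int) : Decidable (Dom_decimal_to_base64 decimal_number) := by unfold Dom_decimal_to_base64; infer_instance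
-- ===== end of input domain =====

-- B builds the string MSB-first with a descending place-value weight instead of A's LSB-first
-- repeated division with prepending; equivalence proved on nonnegative inputs (see Pre_).

-- ===== PORT A =====
def pvChars : String := "ABCDEFGHIJKLMNOPQRSTUVWXYZabcdefghijklmnopqrstuvwxyz0123456789+/"

-- A's while loop: prepend chars[n % 64], continue with n // 64.  The .getD 'A' default is
-- unreachable: 0 ≤ n % 64 < 64 always, so pyGet? is always some.
def pvALoop (n : Int) (s : List Char) : List Char :=
  if _h : 0 < n then
    pvALoop (PySem.Int.floordiv n 64)
      (((PySem.Str.pyGet? pvChars (PySem.Int.mod n 64)).getD 'A') :: s)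
  else s
termination_by n.toNat
decreasing_by
  rw [PySem.Int.floordiv_eq_ediv_of_pos (by norm_num : (0:Int) < 64)]
  omega

def decimal_to_base64 (decimal_number : Int) : String :=
  if decimal_number == 0 then "0" else String.ofList (pvALoop decimal_number [])

-- ===== PORT B =====
-- first while loop of B: grow the weight while weight*64 <= n.
-- The '1 ≤ w' conjunct only makes the recursion total (B always calls it with w = 1).
def pvBWeight (n w : Int) : Int :=
  if h : 1 ≤ w ∧ w * 64 ≤ n then pvBWeight n (w * 64) else w
termination_by (n - w).toNat
decreasing_by omega

-- second while loop of B: emit chars[n // w], continue with n % w and w // 64.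
def pvBDigits (n w : Int) : List Char :=
  if _h : 1 ≤ w then
    ((PySem.Str.pyGet? pvChars (PySem.Int.floordiv n w)).getD 'A')
      :: pvBDigits (PySem.Int.mod n w) (PySem.Int.floordiv w 64)
  else []
termination_by w.toNat
decreasing_by
  rw [PySem.Int.floordiv_eq_ediv_of_pos (by norm_num : (0:Int) < 64)]
  omega

def decimal_to_base64_alt (decimal_number : Int) : String :=
  if decimal_number == 0 then "0"
  else String.ofList (pvBDigits decimal_number (pvBWeight decimal_number 1))

-- ===== PRECONDITION & SPEC =====
-- Pre_ excludes negative inputs, a corner outside the natural domain of base conversion where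
-- no value is specified: A returns '' there and B returns a nonsense digit string, both equally defensible.
def Pre_decimal_to_base64 (decimal_number : Int) : Prop := 0 ≤ decimal_number
instance (decimal_number : Int) : Decidable (Pre_decimal_to_base64 decimal_number) := by
  unfold Pre_decimal_to_base64; infer_instance

def pvWitness_decimal_to_base64 : Int := (5)

def Spec_decimal_to_base64 (decimal_number : Int) (out : String) : Prop :=
  out = decimal_to_base64_alt decimal_number
instance (decimal_number : Int) (out : String) : Decidable (Spec_decimal_to_base64 decimal_number out) := by
  unfold Spec_decimal_to_base64; infer_instance

-- ===== CLAIM (what is proved, stated in full; the proofs are below) =====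
def Claim_equal_decimal_to_base64 : Prop :=
  ∀ (decimal_number : Int), Dom_decimal_to_base64 decimal_number →
    Pre_decimal_to_base64 decimal_number →
    Spec_decimal_to_base64 decimal_number (decimal_to_base64 decimal_number)

-- ===== LEMMAS AND PROOFS =====

-- reference digit list (MSB first), LSB-peeling form, over Nat
def pvRep (m : Nat) : List Char :=
  if h : m < 64 then [(PySem.Str.pyGet? pvChars ((m % 64 : Nat) : Int)).getD 'A']
  else pvRep (m / 64) ++ [(PySem.Str.pyGet? pvChars ((m % 64 : Nat) : Int)).getD 'A']
termination_by m
decreasing_by omega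

-- reference digit list with exactly k+1 positions (MSB-peeling form)
def pvPad (k : Nat) (m : Nat) : List Char :=
  match k with
  | 0 => [(PySem.Str.pyGet? pvChars ((m : Nat) : Int)).getD 'A']
  | k + 1 => ((PySem.Str.pyGet? pvChars ((m / 64 ^ (k + 1) : Nat) : Int)).getD 'A')
      :: pvPad k (m % 64 ^ (k + 1))

theorem pvALoop_eq_rep (m : Nat) (hm : 0 < m) (s : List Char) :
    pvALoop (m : Int) s = pvRep m ++ s := by
  induction m using Nat.strong_induction_on generalizing s with
  | _ m ih =>
    rw [pvALoop]
    rw [dif_pos (show (0:Int) < (m:Int) from by exact_mod_cast hm)]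
    rw [show (64:Int) = ((64:Nat):Int) from by norm_num]
    rw [PySem.Int.floordiv_natCast, PySem.Int.mod_natCast]
    by_cases h64 : m < 64
    · have h0 : m / 64 = 0 := Nat.div_eq_of_lt h64
      rw [h0]
      rw [show ((0:Nat):Int) = 0 from by simp]
      rw [pvALoop, dif_neg (by norm_num)]
      rw [pvRep, dif_pos h64]
      rfl
    · have hlt : m / 64 < m := Nat.div_lt_self hm (by norm_num)
      have hpos : 0 < m / 64 := Nat.div_pos (le_of_not_gt h64) (by norm_num)
      rw [ih _ hlt hpos]
      rw [show pvRep m = pvRep (m / 64) ++ [(PySem.Str.pyGet? pvChars ((m % 64 : Nat) : Int)).getD 'A'] from by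
        conv_lhs => rw [pvRep]
        rw [dif_neg h64]]
      simp

theorem pvPad_lsb (k : Nat) (m : Nat) (hm : m < 64 ^ (k + 2)) :
    pvPad (k + 1) m = pvPad k (m / 64) ++ [(PySem.Str.pyGet? pvChars ((m % 64 : Nat) : Int)).getD 'A'] := by
  induction k generalizing m with
  | zero =>
    simp [pvPad]
  | succ k ih =>
    have h1 : m / 64 / 64 ^ (k + 1) = m / 64 ^ (k + 2) := by
      rw [Nat.div_div_eq_div_mul]; ring_nf
    have h2 : m % 64 ^ (k + 2) / 64 = m / 64 % 64 ^ (k + 1) := by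
      have := Nat.mod_mul_right_div_self m 64 (64 ^ (k + 1))
      rw [show (64:Nat) * 64 ^ (k + 1) = 64 ^ (k + 2) by ring] at this
      exact this
    have h3 : m % 64 ^ (k + 2) % 64 = m % 64 :=
      Nat.mod_mod_of_dvd m (dvd_pow_self 64 (by omega))
    rw [show pvPad (k + 1 + 1) m =
        ((PySem.Str.pyGet? pvChars ((m / 64 ^ (k + 2) : Nat) : Int)).getD 'A')
          :: pvPad (k + 1) (m % 64 ^ (k + 2)) from rfl]
    rw [ih (m % 64 ^ (k + 2)) (lt_of_lt_of_le (Nat.mod_lt m (by positivity)) (by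
      exact Nat.pow_le_pow_right (by norm_num) (by omega)))]
    rw [show pvPad (k + 1) (m / 64) =
        ((PySem.Str.pyGet? pvChars ((m / 64 / 64 ^ (k + 1) : Nat) : Int)).getD 'A')
          :: pvPad k (m / 64 % 64 ^ (k + 1)) from rfl]
    rw [h1, h2, h3]
    simp

theorem pvRep_eq_pad (k : Nat) (m : Nat) (hlo : 64 ^ k ≤ m) (hhi : m < 64 ^ (k + 1)) :
    pvRep m = pvPad k m := by
  induction k generalizing m with
  | zero =>
    have h64 : m < 64 := by simpa using hhi
    rw [pvRep]
    simp [pvPad, h64, Nat.mod_eq_of_lt h64]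
  | succ k ih =>
    have hge : ¬ m < 64 := by
      have : (64:Nat) ≤ 64 ^ (k + 1) := Nat.le_self_pow (by omega) 64
      omega
    rw [pvRep]
    rw [dif_neg hge]
    rw [ih (m / 64) (Nat.le_div_iff_mul_le (by norm_num) |>.mpr (by
        calc 64 ^ k * 64 = 64 ^ (k + 1) := by ring
        _ ≤ m := hlo))
      ((Nat.div_lt_iff_lt_mul (by norm_num)).mpr (by
        calc m < 64 ^ (k + 2) := hhi
        _ = 64 ^ (k + 1) * 64 := by ring))]
    rw [pvPad_lsb k m hhi]

theorem pvBDigits_eq_pad (k : Nat) (m : Nat) (hhi : m < 64 ^ (k + 1)) :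
    pvBDigits (m : Int) ((64 : Int) ^ k) = pvPad k m := by
  induction k generalizing m with
  | zero =>
    rw [pvBDigits]
    rw [dif_pos (by norm_num)]
    rw [pvBDigits]
    rw [dif_neg (by decide)]
    rw [show ((64:Int)^0) = ((1:Nat) : Int) by norm_num, PySem.Int.floordiv_natCast]
    simp [pvPad]
  | succ k ih =>
    have hcast : ((64:Int) ^ (k + 1)) = ((64 ^ (k + 1) : Nat) : Int) := by push_cast; ring
    rw [pvBDigits]
    rw [dif_pos (one_le_pow₀ (by norm_num : (1:Int) ≤ 64))]
    rw [hcast, PySem.Int.floordiv_natCast, PySem.Int.mod_natCast]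
    rw [show PySem.Int.floordiv ((64 ^ (k+1) : Nat) : Int) 64
        = PySem.Int.floordiv ((64 ^ (k+1) : Nat) : Int) ((64 : Nat) : Int) by norm_num]
    rw [PySem.Int.floordiv_natCast]
    rw [show (64 ^ (k+1) / 64 : Nat) = 64 ^ k by
      rw [pow_succ, Nat.mul_div_cancel _ (by norm_num)]]
    rw [show ((64 ^ k : Nat) : Int) = (64:Int) ^ k from by push_cast; ring]
    rw [ih (m % 64 ^ (k + 1)) (lt_of_lt_of_le (Nat.mod_lt m (by positivity))
      (Nat.pow_le_pow_right (by norm_num) (by omega)))]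
    rfl

theorem pvBWeight_spec (n w : Int) (hw : 1 ≤ w) (hle : w ≤ n) :
    ∃ j : Nat, pvBWeight n w = w * 64 ^ j ∧ w * 64 ^ j ≤ n ∧ n < w * 64 ^ (j + 1) := by
  have hmeas : 0 ≤ n - w := by omega
  generalize hM : (n - w).toNat = M
  induction M using Nat.strong_induction_on generalizing w with
  | _ M ih =>
    rw [pvBWeight]
    by_cases hcond : w * 64 ≤ n
    · rw [dif_pos ⟨hw, hcond⟩]
      have hw' : 1 ≤ w * 64 := by omega
      obtain ⟨j, h1, h2, h3⟩ := ih ((n - w * 64).toNat) (by omega) (w * 64) hw' hcond (by omega) rfl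
      refine ⟨j + 1, ?_, ?_, ?_⟩
      · rw [h1]; ring
      · calc w * 64 ^ (j + 1) = w * 64 * 64 ^ j := by ring
          _ ≤ n := h2
      · calc n < w * 64 * 64 ^ (j + 1) := h3
          _ = w * 64 ^ (j + 1 + 1) := by ring
    · rw [dif_neg (by tauto)]
      exact ⟨0, by ring, by simpa using hle, by simpa using hcond⟩

-- ===== VERDICT (by name: the statement is the Claim_ definition above) =====
theorem decimal_to_base64_spec : Claim_equal_decimal_to_base64 := by
  intro n _ hpre
  unfold Spec_decimal_to_base64 decimal_to_base64 decimal_to_base64_alt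
  by_cases h0 : n = 0
  · simp [h0]
  · have hpos : 0 < n := lt_of_le_of_ne hpre (Ne.symm h0)
    rw [if_neg (by simpa using h0), if_neg (by simpa using h0)]
    obtain ⟨j, hbw, hlo, hhi⟩ := pvBWeight_spec n 1 le_rfl (by omega)
    simp only [one_mul] at hbw hlo hhi
    have hm : n = ((n.toNat : Nat) : Int) := by omega
    have hlo' : 64 ^ j ≤ n.toNat := by
      have : ((64:Int) ^ j) = ((64 ^ j : Nat) : Int) := by push_cast; ring
      omega
    have hhi' : n.toNat < 64 ^ (j + 1) := by
      have : ((64:Int) ^ (j+1)) = ((64 ^ (j+1) : Nat) : Int) := by push_cast; ring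
      omega
    rw [hbw, hm]
    rw [pvBDigits_eq_pad j n.toNat hhi']
    rw [pvALoop_eq_rep n.toNat (by omega) []]
    rw [pvRep_eq_pad j n.toNat hlo' hhi']
    simp
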